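-- pv_equiv track=rewrite | github.com/phumipatc/CU_Submissions | ComProg/09_MoreDC/09_NestedList_34_Fill_In_Number.py | pattern3
-- ===== SOURCE A (Python) =====
-- def pattern3(N):
--     ret = [[0]*N for i in range(N)]
--     cnt = 1
--     for i in range(N):
--         for j in range(i, N):
--             ret[i][j] = cnt
--             cnt += 1
--     return ret
-- ===== SOURCE B (Python) =====
-- def pattern3(N):
--     def row(i):
--         start = 1 + i * N - i * (i - 1) // 2
--         return [0] * i + list(range(start, start + N - i))
--     return [row(i) for i in range(N)]
-- ===== Notes on version B (the rewrite author's own statement) =====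
-- stated objective: alternative
-- what changed: Replaced the running counter threaded through nested in-place mutation loops by a per-row closed form: row i is [0]*i followed by range(start_i, start_i+N-i) with start_i = 1 + i*N - i*(i-1)//2, so every entry is computed independently of the others.
import Mathlib
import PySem

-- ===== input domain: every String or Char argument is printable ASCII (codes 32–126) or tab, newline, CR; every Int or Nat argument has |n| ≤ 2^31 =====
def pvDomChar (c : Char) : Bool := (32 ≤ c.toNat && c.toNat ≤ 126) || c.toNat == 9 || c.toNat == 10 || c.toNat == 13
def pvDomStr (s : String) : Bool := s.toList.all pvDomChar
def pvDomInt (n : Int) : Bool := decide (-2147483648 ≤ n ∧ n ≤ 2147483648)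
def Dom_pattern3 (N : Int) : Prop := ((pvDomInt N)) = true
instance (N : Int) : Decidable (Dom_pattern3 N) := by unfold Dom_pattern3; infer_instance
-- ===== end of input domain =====

-- B replaces A's running counter and in-place nested mutation by a per-row closed form
-- (row i = i zeros then range(start_i, start_i+N-i), start_i = 1 + i*N - i*(i-1)//2); objective: alternative.

-- ===== PORT A =====
-- the body of A's inner loop: ret[i][j] = cnt; cnt += 1   (indices are in range here, so pySetD/pyGetD are exact)
def innerStep (i : Int) (st2 : List (List Int) × Int) (j : Int) : List (List Int) × Int :=
  (PySem.List.pySetD st2.1 i (PySem.List.pySetD (PySem.List.pyGetD st2.1 i []) j st2.2), st2.2 + 1)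

-- A's outer-loop body: for j in range(i, N): …
def outerStep (N : Int) (st : List (List Int) × Int) (i : Int) : List (List Int) × Int :=
  (PySem.List.pyRange i N 1).foldl (innerStep i) st

def pattern3 (N : Int) : List (List Int) :=
  -- [[0]*N for i in range(N)]; List.replicate N.toNat is exact: Python's [0]*N is [] for N < 0
  ((PySem.List.pyRange 0 N 1).foldl (outerStep N)
    ((PySem.List.pyRange 0 N 1).map (fun _ => List.replicate N.toNat (0 : Int)), 1)).1

-- ===== PORT B =====
def pattern3_alt (N : Int) : List (List Int) :=
  (PySem.List.pyRange 0 N 1).map (fun i =>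
    let start := 1 + i * N - PySem.Int.floordiv (i * (i - 1)) 2
    List.replicate i.toNat (0 : Int) ++ PySem.List.pyRange start (start + N - i) 1)

-- ===== PRECONDITION & SPEC =====
def Spec_pattern3 (N : Int) (out : List (List Int)) : Prop := out = pattern3_alt N
instance (N : Int) (out : List (List Int)) : Decidable (Spec_pattern3 N out) := by unfold Spec_pattern3; infer_instance

-- ===== CLAIM (what is proved, stated in full; the proofs are below) =====
def Claim_equal_pattern3 : Prop := ∀ (N : Int), Dom_pattern3 N → Spec_pattern3 N (pattern3 N)

-- ===== LEMMAS AND PROOFS =====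

-- writeSeq r p c k : set positions p, p+1, …, p+k-1 of r to c, c+1, …
def writeSeq (r : List Int) (p : Nat) (c : Int) : Nat → List Int
  | 0 => r
  | k+1 => writeSeq (r.set p c) (p+1) (c+1) k

-- the rows i, i+1, …, N-1 of B's answer, with running start value c
def buildRows (N : Int) : Nat → Int → Int → List (List Int)
  | 0, _, _ => []
  | k+1, i, c =>
      (List.replicate i.toNat (0 : Int) ++ PySem.List.pyRange c (c + N - i) 1)
        :: buildRows N k (i+1) (c + N - i)

lemma writeSeq_eq (k : Nat) : ∀ (r : List Int) (p : Nat) (c : Int), p + k ≤ r.length →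
    writeSeq r p c k = r.take p ++ PySem.List.pyRange c (c + k) 1 ++ r.drop (p + k) := by
  induction k with
  | zero =>
    intro r p c h
    simp only [writeSeq, Nat.cast_zero, add_zero]
    rw [PySem.List.pyRange_one_eq_nil le_rfl]
    simp
  | succ k ih =>
    intro r p c h
    have hp : p < r.length := by omega
    rw [writeSeq, ih _ _ _ (by simpa using (by omega : p + 1 + k ≤ r.length))]
    rw [List.take_set, List.drop_set, if_pos (by omega)]
    have htake : (r.take (p+1)).set p c = r.take p ++ [c] := by
      rw [List.set_eq_take_append_cons_drop, if_pos (by simp; omega)]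
      simp [List.take_take]
    have hr2 : c + 1 + (k : Int) = c + ((k+1 : Nat) : Int) := by push_cast; ring
    have hr : PySem.List.pyRange c (c + ((k+1 : Nat) : Int)) 1
        = c :: PySem.List.pyRange (c+1) (c + ((k+1 : Nat) : Int)) 1 :=
      PySem.List.pyRange_one_cons (by push_cast; omega)
    rw [htake, hr2, hr]
    have : p + 1 + k = p + (k + 1) := by omega
    rw [this]
    simp

lemma inner_eq (i : Int) (hi : 0 ≤ i) (N : Int) (k : Nat) :
    ∀ (j : Int) (ret : List (List Int)) (cnt : Int),
    0 ≤ j → j ≤ N → k = (N - j).toNat → i.toNat < ret.length →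
    (PySem.List.pyRange j N 1).foldl (innerStep i) (ret, cnt)
      = (ret.set i.toNat (writeSeq (PySem.List.pyGetD ret i []) j.toNat cnt k), cnt + (N - j)) := by
  induction k with
  | zero =>
    intro j ret cnt hj hjN hk hlen
    have hje : j = N := by omega
    subst hje
    rw [PySem.List.pyRange_one_eq_nil le_rfl]
    simp only [List.foldl_nil, writeSeq]
    rw [PySem.List.pyGetD_eq_getElem _ _ hi (by exact_mod_cast by omega : i < (ret.length : Int))]
    rw [List.set_getElem_self]
    simp
  | succ k ih =>
    intro j ret cnt hj hjN hk hlen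
    have hjltN : j < N := by omega
    rw [PySem.List.pyRange_one_cons hjltN, List.foldl_cons]
    have hstep : innerStep i (ret, cnt) j
        = (ret.set i.toNat ((PySem.List.pyGetD ret i []).set j.toNat cnt), cnt + 1) := by
      simp [innerStep, PySem.List.pySetD_of_nonneg _ _ hi, PySem.List.pySetD_of_nonneg _ _ hj]
    rw [hstep, ih (j+1) _ _ (by omega) (by omega) (by omega) (by simpa using hlen)]
    have hget : PySem.List.pyGetD (ret.set i.toNat ((PySem.List.pyGetD ret i []).set j.toNat cnt)) i []
        = (PySem.List.pyGetD ret i []).set j.toNat cnt := by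
      rw [PySem.List.pyGetD_eq_getElem _ _ hi (by simp; exact_mod_cast by omega : i < ((ret.set i.toNat ((PySem.List.pyGetD ret i []).set j.toNat cnt)).length : Int))]
      exact List.getElem_set_self (by simpa using hlen)
    rw [hget, List.set_set]
    have hj1 : (j+1).toNat = j.toNat + 1 := by omega
    rw [hj1]
    have hcnt : cnt + 1 + (N - (j+1)) = cnt + (N - j) := by ring
    rw [hcnt]
    rfl

lemma outer_eq (N : Int) (k : Nat) : ∀ (i : Int) (P : List (List Int)) (c : Int),
    0 ≤ i → k = (N - i).toNat → P.length = i.toNat →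
    ((PySem.List.pyRange i N 1).foldl (outerStep N)
        (P ++ List.replicate k (List.replicate N.toNat (0 : Int)), c)).1
      = P ++ buildRows N k i c := by
  induction k with
  | zero =>
    intro i P c hi hk hP
    rw [PySem.List.pyRange_one_eq_nil (by omega)]
    simp [buildRows]
  | succ k ih =>
    intro i P c hi hk hP
    have hiN : i < N := by omega
    rw [PySem.List.pyRange_one_cons hiN, List.foldl_cons]
    have hlen : i.toNat < (P ++ List.replicate (k+1) (List.replicate N.toNat (0 : Int))).length := by
      simp [hP]
    have hstep := inner_eq i hi N (k+1) i
      (P ++ List.replicate (k+1) (List.replicate N.toNat (0 : Int))) c hi (le_of_lt hiN) hk hlen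
    have hget : PySem.List.pyGetD (P ++ List.replicate (k+1) (List.replicate N.toNat (0 : Int))) i []
        = List.replicate N.toNat (0 : Int) := by
      rw [PySem.List.pyGetD_eq_getElem _ _ hi (by exact_mod_cast by omega : i < ((P ++ List.replicate (k+1) (List.replicate N.toNat (0 : Int))).length : Int))]
      rw [List.getElem_append_right (by omega)]
      simp
    have hwrite : writeSeq (List.replicate N.toNat (0 : Int)) i.toNat c (k+1)
        = List.replicate i.toNat (0 : Int) ++ PySem.List.pyRange c (c + N - i) 1 := by
      rw [writeSeq_eq (k+1) _ _ _ (by simp; omega)]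
      rw [List.take_replicate, List.drop_replicate]
      have h1 : min i.toNat N.toNat = i.toNat := by omega
      have h2 : N.toNat - (i.toNat + (k+1)) = 0 := by omega
      have h3 : c + ((k+1 : Nat) : Int) = c + N - i := by omega
      rw [h1, h2, h3]
      simp
    have hset : (P ++ List.replicate (k+1) (List.replicate N.toNat (0 : Int))).set i.toNat
          (List.replicate i.toNat (0 : Int) ++ PySem.List.pyRange c (c + N - i) 1)
        = (P ++ [List.replicate i.toNat (0 : Int) ++ PySem.List.pyRange c (c + N - i) 1])
            ++ List.replicate k (List.replicate N.toNat (0 : Int)) := by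
      rw [List.set_append, if_neg (by omega)]
      rw [hP, Nat.sub_self, List.replicate_succ, List.set_cons_zero, List.append_cons]
    have hc : c + (N - i) = c + N - i := by ring
    rw [show outerStep N (P ++ List.replicate (k+1) (List.replicate N.toNat (0 : Int)), c) i
        = (PySem.List.pyRange i N 1).foldl (innerStep i)
            (P ++ List.replicate (k+1) (List.replicate N.toNat (0 : Int)), c) from rfl]
    rw [hstep, hget, hwrite, hset, hc]
    rw [ih (i+1) _ (c + N - i) (by omega) (by omega) (by simp [hP]; omega)]
    simp [buildRows]

lemma buildRows_eq (N : Int) (k : Nat) : ∀ (i : Int), 0 ≤ i → k = (N - i).toNat →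
    buildRows N k i (1 + i * N - PySem.Int.floordiv (i * (i - 1)) 2)
      = (PySem.List.pyRange i N 1).map (fun i =>
          let start := 1 + i * N - PySem.Int.floordiv (i * (i - 1)) 2
          List.replicate i.toNat (0 : Int) ++ PySem.List.pyRange start (start + N - i) 1) := by
  induction k with
  | zero =>
    intro i hi hk
    rw [PySem.List.pyRange_one_eq_nil (by omega)]
    simp [buildRows]
  | succ k ih =>
    intro i hi hk
    have hiN : i < N := by omega
    rw [PySem.List.pyRange_one_cons hiN, List.map_cons, buildRows]
    have e1 : PySem.Int.floordiv (i * (i - 1)) 2 = i * (i - 1) / 2 :=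
      PySem.Int.floordiv_eq_ediv_of_pos (by norm_num)
    have e2 : PySem.Int.floordiv ((i+1) * ((i+1) - 1)) 2 = (i+1) * ((i+1) - 1) / 2 :=
      PySem.Int.floordiv_eq_ediv_of_pos (by norm_num)
    have h3 : (i+1) * ((i+1) - 1) = i * (i - 1) + i * 2 := by ring
    have h4 : (i * (i - 1) + i * 2) / 2 = i * (i - 1) / 2 + i :=
      Int.add_mul_ediv_right _ _ (by norm_num)
    have harith : (1 + i * N - PySem.Int.floordiv (i * (i - 1)) 2) + N - i
        = 1 + (i+1) * N - PySem.Int.floordiv ((i+1) * ((i+1) - 1)) 2 := by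
      rw [e1, e2, h3, h4]; ring
    congr 1
    rw [harith]
    exact ih (i+1) (by omega) (by omega)

-- ===== VERDICT (by name: the statement is the Claim_ definition above) =====
theorem pattern3_spec : Claim_equal_pattern3 := by
  intro N _
  show pattern3 N = pattern3_alt N
  have hz : PySem.Int.floordiv ((0:Int) * (0 - 1)) 2 = 0 := by decide
  have hout := outer_eq N ((N - 0).toNat) 0 [] 1 le_rfl rfl rfl
  simp only [List.nil_append] at hout
  have hbuild := buildRows_eq N ((N - 0).toNat) 0 le_rfl rfl
  rw [show (1 + (0:Int) * N - PySem.Int.floordiv ((0:Int) * (0 - 1)) 2) = 1 by rw [hz]; ring] at hbuild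
  unfold pattern3 pattern3_alt
  rw [List.map_const', PySem.List.length_pyRange_one]
  rw [hout, hbuild]
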